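-- pv_equiv track=rewrite | github.com/eronekogin/leetcode | 2022/find_latest_group_of_size_m.py | findLatestStep
-- ===== SOURCE A (Python) =====
-- def findLatestStep(arr: list[int], m: int) -> int:
--     n = len(arr)
--     if n == m:
--         return len(arr)
--
--     currGroups = [(0, len(arr) - 1)]
--     for step in range(n - 1, 0, -1):
--         if not currGroups:  # Not enough length of group to split.
--             return -1
--
--         splitIndex = arr[step] - 1
--         nextGroups: list[tuple[int]] = []
--         for start, end in currGroups:
--             if start <= splitIndex <= end:
--                 if splitIndex - start == m:
--                     return step
--                 elif splitIndex - start > m: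
--                     nextGroups.append((start, splitIndex - 1))
--
--                 if end - splitIndex == m:
--                     return step
--                 elif end - splitIndex > m:
--                     nextGroups.append((splitIndex + 1, end))
--             else:
--                 nextGroups.append((start, end))
--
--         currGroups = nextGroups
-- ===== SOURCE B (Python) =====
-- def _split(groups, s, m):
--     # groups is sorted and disjoint: binary descent to the unique group
--     # that can contain s; returns (hit-size-m?, new group list).
--     if not groups:
--         return False, []
--     k = len(groups) // 2
--     st, en = groups[k]
--     if s < st:
--         hit, left = _split(groups[:k], s, m)
--         return (True, []) if hit else (False, left + groups[k:])
--     if s > en: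
--         hit, right = _split(groups[k + 1:], s, m)
--         return (True, []) if hit else (False, groups[:k + 1] + right)
--     if s - st == m or en - s == m:
--         return True, []
--     pieces = []
--     if s - st > m:
--         pieces.append((st, s - 1))
--     if en - s > m:
--         pieces.append((s + 1, en))
--     return False, groups[:k] + pieces + groups[k + 1:]
--
--
-- def findLatestStep(arr: list[int], m: int) -> int:
--     n = len(arr)
--     if n == m:
--         return n
--     groups = [(0, n - 1)]
--     for step in range(n - 1, 0, -1):
--         if not groups:
--             return -1
--         hit, groups = _split(groups, arr[step] - 1, m)
--         if hit:
--             return step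
-- ===== Notes on version B (the rewrite author's own statement) =====
-- stated objective: alternative
-- what changed: A rescans and rebuilds the whole group list at every step; B keeps the groups sorted and disjoint and does a binary descent into that list to find the one group the split index can fall in, splicing only around it.
import Mathlib
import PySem

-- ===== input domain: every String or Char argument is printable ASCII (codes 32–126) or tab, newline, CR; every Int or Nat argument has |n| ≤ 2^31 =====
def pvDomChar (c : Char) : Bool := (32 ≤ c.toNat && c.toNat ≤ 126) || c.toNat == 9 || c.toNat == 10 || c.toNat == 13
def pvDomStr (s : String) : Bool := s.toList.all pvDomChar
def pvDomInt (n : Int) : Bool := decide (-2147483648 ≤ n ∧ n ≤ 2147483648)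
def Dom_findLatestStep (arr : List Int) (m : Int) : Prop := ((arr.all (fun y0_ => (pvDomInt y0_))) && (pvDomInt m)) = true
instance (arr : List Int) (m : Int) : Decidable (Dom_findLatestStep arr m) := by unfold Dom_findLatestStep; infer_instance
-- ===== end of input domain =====

-- B replaces A's full rescan-and-rebuild of the group list at every step by a
-- binary descent into the sorted disjoint group list (objective: alternative).

-- ===== PORT A =====
-- inner `for start, end in currGroups` loop of A; `none` = an early `return step`.
def innerA (m s : Int) : List (Int × Int) → Option (List (Int × Int))
  | [] => some []
  | (st, en) :: rest =>
    if st ≤ s ∧ s ≤ en then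
      if s - st = m then none
      else
        let left := if s - st > m then [(st, s - 1)] else []
        if en - s = m then none
        else
          let right := if en - s > m then [(s + 1, en)] else []
          (innerA m s rest).map (fun r => left ++ right ++ r)
    else (innerA m s rest).map (fun r => (st, en) :: r)

-- outer `for step in range(n-1, 0, -1)` loop of A.
def loopA (arr : List Int) (m : Int) : List Int → List (Int × Int) → Option Int
  | [], _ => none
  | step :: rest, groups =>
    if groups.isEmpty then some (-1)
    else
      -- `arr[step]`: step is always a valid index here, so the default is never used
      let s := (PySem.List.pyGet? arr step).getD 0 - 1
      match innerA m s groups with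
      | none => some step
      | some next => loopA arr m rest next

def findLatestStep (arr : List Int) (m : Int) : Option Int :=
  let n : Int := arr.length
  if n = m then some n
  else loopA arr m (PySem.List.pyRange (n - 1) 0 (-1)) [(0, n - 1)]

-- ===== PORT B =====
-- `_split` of Source B: binary descent; slices `groups[:k]` / `groups[k:]` ported as take/drop.
-- `fuel` (= initial list length) only makes the recursion structural; it is never exhausted.
def splitBGo (m s : Int) (fuel : Nat) (groups : List (Int × Int)) : Bool × List (Int × Int) :=
  match fuel with
  | 0 => (false, [])
  | fuel + 1 =>
    if groups.length = 0 then (false, [])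
    else
      let k := groups.length / 2
      let g := groups.getD k (0, 0)   -- groups[k], k < len(groups)
      if s < g.1 then
        let p := splitBGo m s fuel (groups.take k)
        if p.1 then (true, []) else (false, p.2 ++ groups.drop k)
      else if s > g.2 then
        let p := splitBGo m s fuel (groups.drop (k + 1))
        if p.1 then (true, []) else (false, groups.take (k + 1) ++ p.2)
      else if s - g.1 = m ∨ g.2 - s = m then (true, [])
      else
        let pieces := (if s - g.1 > m then [(g.1, s - 1)] else [])
          ++ (if g.2 - s > m then [(s + 1, g.2)] else [])
        (false, groups.take k ++ pieces ++ groups.drop (k + 1))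

def splitB (m s : Int) (groups : List (Int × Int)) : Bool × List (Int × Int) :=
  splitBGo m s groups.length groups

-- outer `for step in range(n-1, 0, -1)` loop of B.
def loopB (arr : List Int) (m : Int) : List Int → List (Int × Int) → Option Int
  | [], _ => none
  | step :: rest, groups =>
    if groups.isEmpty then some (-1)
    else
      let p := splitB m (((PySem.List.pyGet? arr step).getD 0) - 1) groups
      if p.1 then some step
      else loopB arr m rest p.2

def findLatestStep_alt (arr : List Int) (m : Int) : Option Int :=
  let n : Int := arr.length
  if n = m then some n
  else loopB arr m (PySem.List.pyRange (n - 1) 0 (-1)) [(0, n - 1)]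

-- ===== PRECONDITION & SPEC =====
def Spec_findLatestStep (arr : List Int) (m : Int) (out : Option Int) : Prop := out = findLatestStep_alt arr m
instance (arr : List Int) (m : Int) (out : Option Int) : Decidable (Spec_findLatestStep arr m out) := by unfold Spec_findLatestStep; infer_instance

-- ===== CLAIM (what is proved, stated in full; the proofs are below) =====
def Claim_equal_findLatestStep : Prop := ∀ (arr : List Int) (m : Int), Dom_findLatestStep arr m → Spec_findLatestStep arr m (findLatestStep arr m)

-- ===== LEMMAS AND PROOFS =====

-- invariant: groups are pairwise disjoint in increasing order, and each (st, en) has st ≤ en + 1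
def GInv (l : List (Int × Int)) : Prop :=
  l.Pairwise (fun a b => a.2 < b.1) ∧ ∀ g ∈ l, g.1 ≤ g.2 + 1

theorem innerA_no_container (m s : Int) (groups : List (Int × Int))
    (h : ∀ g ∈ groups, ¬ (g.1 ≤ s ∧ s ≤ g.2)) : innerA m s groups = some groups := by
  induction groups with
  | nil => rfl
  | cons g rest ih =>
    obtain ⟨st, en⟩ := g
    have hg := h (st, en) (List.mem_cons_self ..)
    rw [innerA, if_neg hg, ih (fun x hx => h x (List.mem_cons_of_mem _ hx))]
    rfl

theorem innerA_append_right (m s : Int) (xs ys : List (Int × Int))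
    (h : ∀ g ∈ ys, ¬ (g.1 ≤ s ∧ s ≤ g.2)) :
    innerA m s (xs ++ ys) = (innerA m s xs).map (· ++ ys) := by
  induction xs with
  | nil => simp [innerA_no_container m s ys h, innerA]
  | cons g rest ih =>
    obtain ⟨st, en⟩ := g
    simp only [List.cons_append, innerA, ih]
    by_cases hc : st ≤ s ∧ s ≤ en
    · simp only [if_pos hc]
      split_ifs <;> cases innerA m s rest <;> simp
    · simp only [if_neg hc]
      cases innerA m s rest <;> simp

theorem innerA_append_left (m s : Int) (xs ys : List (Int × Int))
    (h : ∀ g ∈ xs, ¬ (g.1 ≤ s ∧ s ≤ g.2)) :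
    innerA m s (xs ++ ys) = (innerA m s ys).map (xs ++ ·) := by
  induction xs with
  | nil => simp
  | cons g rest ih =>
    obtain ⟨st, en⟩ := g
    have hg := h (st, en) (List.mem_cons_self ..)
    simp only [List.cons_append, innerA, if_neg hg,
      ih (fun x hx => h x (List.mem_cons_of_mem _ hx))]
    cases innerA m s ys <;> simp

-- the key lemma: under the invariant, A's linear rebuild and B's binary descent agree
theorem inner_eq (m s : Int) : ∀ (N : Nat) (groups : List (Int × Int)), groups.length ≤ N →
    GInv groups →
    innerA m s groups =
      (if (splitBGo m s N groups).1 then none else some (splitBGo m s N groups).2) := by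
  intro N
  induction N with
  | zero =>
    intro groups hN _
    have : groups = [] := List.eq_nil_of_length_eq_zero (Nat.le_zero.mp hN)
    subst this
    simp [splitBGo, innerA]
  | succ N ih =>
    intro groups hN hinv
    by_cases h0 : groups.length = 0
    · have : groups = [] := List.eq_nil_of_length_eq_zero h0
      subst this; cases N <;> simp [splitBGo, innerA]
    · set k := groups.length / 2 with hk
      have hklt : k < groups.length := Nat.div_lt_self (Nat.pos_of_ne_zero h0) (by omega)
      have hdecomp : groups = groups.take k ++ groups[k] :: groups.drop (k + 1) := by
        conv_lhs => rw [← List.take_append_drop k groups]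
        rw [List.drop_eq_getElem_cons hklt]
      have hgetD : groups.getD k (0, 0) = groups[k] := List.getD_eq_getElem _ _ hklt
      set xs := groups.take k with hxs
      set g := groups[k] with hgL
      set ys := groups.drop (k + 1) with hys
      -- facts from the invariant across the decomposition
      have hpw : (xs ++ g :: ys).Pairwise (fun a b => a.2 < b.1) := hdecomp ▸ hinv.1
      rw [List.pairwise_append] at hpw
      have hxs_g : ∀ x ∈ xs, x.2 < g.1 := fun x hx => hpw.2.2 x hx g (List.mem_cons_self ..)
      have hxs_ys : ∀ x ∈ xs, ∀ y ∈ ys, x.2 < y.1 := fun x hx y hy =>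
        hpw.2.2 x hx y (List.mem_cons_of_mem _ hy)
      have hg_ys : ∀ y ∈ ys, g.2 < y.1 := (List.pairwise_cons.mp hpw.2.1).1
      have hwf : ∀ x ∈ groups, x.1 ≤ x.2 + 1 := hinv.2
      have hwfg : g.1 ≤ g.2 + 1 := hwf g (hdecomp ▸ List.mem_append_right _ (List.mem_cons_self ..))
      have hwfxs : ∀ x ∈ xs, x.1 ≤ x.2 + 1 := fun x hx => hwf x (hdecomp ▸ List.mem_append_left _ hx)
      have hwfys : ∀ y ∈ ys, y.1 ≤ y.2 + 1 := fun y hy =>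
        hwf y (hdecomp ▸ List.mem_append_right _ (List.mem_cons_of_mem _ hy))
      have hlxs : xs.length ≤ N := by
        have := List.length_take_le k groups; simp only [hxs]; omega
      have hlys : ys.length ≤ N := by simp only [hys, List.length_drop]; omega
      have hinvxs : GInv xs := ⟨hpw.1, hwfxs⟩
      have hinvys : GInv ys := ⟨(List.pairwise_cons.mp hpw.2.1).2, hwfys⟩
      rw [splitBGo]
      simp only [if_neg h0, ← hk, hgetD, ← hgL, ← hxs, ← hys]
      by_cases h1 : s < g.1
      · -- the container, if any, is in the left half
        have hnc : ∀ y ∈ g :: ys, ¬ (y.1 ≤ s ∧ s ≤ y.2) := by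
          intro y hy
          rcases List.mem_cons.mp hy with rfl | hy
          · omega
          · have h2 := hg_ys y hy; push_neg; intro h3; omega
        have : innerA m s groups = (innerA m s xs).map (· ++ (g :: ys)) := by
          rw [hdecomp]; exact innerA_append_right m s xs (g :: ys) hnc
        have hdropk : groups.drop k = g :: ys := by
          rw [hgL, hys]; exact List.drop_eq_getElem_cons hklt
        rw [this, ih xs hlxs hinvxs, if_pos h1, hdropk]
        rcases hsp : splitBGo m s N xs with ⟨b, l⟩
        cases b <;> simp
      · rw [if_neg h1]
        by_cases h2 : s > g.2
        · -- the container, if any, is in the right half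
          have hnc : ∀ x ∈ xs ++ [g], ¬ (x.1 ≤ s ∧ s ≤ x.2) := by
            intro x hx
            rcases List.mem_append.mp hx with hx | hx
            · have h3 := hxs_g x hx; have h4 := hwfg; push_neg; intro h5; omega
            · simp at hx; subst hx; omega
          have hdec2 : groups = (xs ++ [g]) ++ ys := by rw [hdecomp]; simp
          have htk : groups.take (k + 1) = xs ++ [g] := by
            rw [List.take_succ, hgetD.symm]; congr 1
            simp [List.getD, hklt, List.getElem?_eq_getElem]
          have : innerA m s groups = (innerA m s ys).map ((xs ++ [g]) ++ ·) := by
            rw [hdec2]; exact innerA_append_left m s (xs ++ [g]) ys hnc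
          rw [this, ih ys hlys hinvys, if_pos h2, htk]
          rcases hsp : splitBGo m s N ys with ⟨b, l⟩
          cases b <;> simp
        · -- g contains s
          have hcont : g.1 ≤ s ∧ s ≤ g.2 := by omega
          have hncx : ∀ x ∈ xs, ¬ (x.1 ≤ s ∧ s ≤ x.2) := by
            intro x hx; have := hxs_g x hx; push_neg; intro h3; omega
          have hncy : ∀ y ∈ ys, ¬ (y.1 ≤ s ∧ s ≤ y.2) := by
            intro y hy; have := hg_ys y hy; push_neg; intro h3; omega
          have : innerA m s groups = (innerA m s (g :: ys)).map (xs ++ ·) := by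
            rw [hdecomp]; exact innerA_append_left m s xs (g :: ys) hncx
          rw [this]
          rcases g with ⟨st, en⟩
          dsimp only at h1 h2 hcont ⊢
          rw [innerA, if_pos hcont, innerA_no_container m s ys hncy]
          simp only [if_neg h2, not_lt.mp h1]
          by_cases hL : s - st = m
          · simp [hL]
          · by_cases hR : en - s = m
            · simp [hL, hR]
            · have hor : ¬ (s - st = m ∨ en - s = m) := by
                intro hor; rcases hor with hor | hor <;> [exact hL hor; exact hR hor]
              simp only [if_neg hor, if_neg hL, if_neg hR, Option.map_some]
              split_ifs <;> first | omega | simp [List.append_assoc]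

-- the invariant is preserved by A's rebuild (and each new group fits inside an old one)
theorem innerA_inv (m s : Int) : ∀ (groups g' : List (Int × Int)), GInv groups →
    innerA m s groups = some g' →
    GInv g' ∧ ∀ x ∈ g', ∃ y ∈ groups, y.1 ≤ x.1 ∧ x.2 ≤ y.2 := by
  intro groups
  induction groups with
  | nil => intro g' _ h; rw [innerA] at h; simp at h; subst h; exact ⟨⟨by simp, by simp⟩, by simp⟩
  | cons g rest ih =>
    intro g' hinv h
    obtain ⟨st, en⟩ := g
    have hpw := List.pairwise_cons.mp hinv.1
    have hinvrest : GInv rest := ⟨hpw.2, fun x hx => hinv.2 x (List.mem_cons_of_mem _ hx)⟩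
    have hwfg : st ≤ en + 1 := hinv.2 (st, en) (List.mem_cons_self ..)
    rw [innerA] at h
    by_cases hc : st ≤ s ∧ s ≤ en
    · rw [if_pos hc] at h
      by_cases hL : s - st = m
      · rw [if_pos hL] at h; exact absurd h (by simp)
      rw [if_neg hL] at h
      simp only [] at h
      by_cases hR : en - s = m
      · rw [if_pos hR] at h; exact absurd h (by simp)
      rw [if_neg hR] at h
      set left : List (Int × Int) := if s - st > m then [(st, s - 1)] else [] with hleft
      set right : List (Int × Int) := if en - s > m then [(s + 1, en)] else [] with hright
      rcases Option.map_eq_some_iff.mp h with ⟨r', hr', rfl⟩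
      obtain ⟨⟨hpw', hwf'⟩, hbnd⟩ := ih r' hinvrest hr'
      have hmemlr : ∀ x ∈ left ++ right, st ≤ x.1 ∧ x.2 ≤ en ∧ x.1 ≤ x.2 + 1 := by
        intro x hx
        have hx2 : x = (st, s - 1) ∨ x = (s + 1, en) := by
          rw [hleft, hright] at hx
          rcases List.mem_append.mp hx with hx | hx <;> split_ifs at hx <;>
            simp at hx <;> simp [hx]
        rcases hx2 with rfl | rfl
        · exact ⟨le_refl _, by simp; omega, by simp; omega⟩
        · exact ⟨by simp; omega, le_refl _, by simp; omega⟩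
      have hr'lb : ∀ y ∈ r', en < y.1 := by
        intro y hy
        obtain ⟨z, hz, hz1, hz2⟩ := hbnd y hy
        have := hpw.1 z hz; simp at this; omega
      have hpwlr : (left ++ right).Pairwise (fun a b => (a : Int × Int).2 < b.1) := by
        rw [hleft, hright]; split_ifs <;> simp <;> omega
      refine ⟨⟨?_, ?_⟩, ?_⟩
      · rw [List.pairwise_append]
        refine ⟨hpwlr, hpw', ?_⟩
        intro x hx y hy
        have h1 := (hmemlr x hx).2.1
        have h2 := hr'lb y hy
        omega
      · intro x hx
        rcases List.mem_append.mp hx with hx | hx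
        · exact (hmemlr x hx).2.2
        · exact hwf' x hx
      · intro x hx
        rcases List.mem_append.mp hx with hx | hx
        · exact ⟨(st, en), List.mem_cons_self .., (hmemlr x hx).1, (hmemlr x hx).2.1⟩
        · obtain ⟨y, hy, h1, h2⟩ := hbnd x hx
          exact ⟨y, List.mem_cons_of_mem _ hy, h1, h2⟩
    · rw [if_neg hc] at h
      rcases Option.map_eq_some_iff.mp h with ⟨r', hr', rfl⟩
      obtain ⟨⟨hpw', hwf'⟩, hbnd⟩ := ih r' hinvrest hr'
      refine ⟨⟨List.pairwise_cons.mpr ⟨?_, hpw'⟩, ?_⟩, ?_⟩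
      · intro x hx
        obtain ⟨y, hy, hy1, hy2⟩ := hbnd x hx
        have := hpw.1 y hy; omega
      · intro x hx
        rcases List.mem_cons.mp hx with rfl | hx
        · exact hwfg
        · exact hwf' x hx
      · intro x hx
        rcases List.mem_cons.mp hx with rfl | hx
        · exact ⟨(st, en), List.mem_cons_self .., le_refl _, le_refl _⟩
        · obtain ⟨y, hy, h1, h2⟩ := hbnd x hx
          exact ⟨y, List.mem_cons_of_mem _ hy, h1, h2⟩

theorem loop_eq (arr : List Int) (m : Int) : ∀ (steps : List Int) (groups : List (Int × Int)),
    GInv groups → loopA arr m steps groups = loopB arr m steps groups := by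
  intro steps
  induction steps with
  | nil => intro groups _; rfl
  | cons step rest ih =>
    intro groups hinv
    simp only [loopA, loopB]
    by_cases he : groups.isEmpty
    · simp [he]
    · simp only [if_neg he]
      have hie := inner_eq m ((PySem.List.pyGet? arr step).getD 0 - 1) groups.length groups
        (le_refl _) hinv
      rcases hsp : splitB m ((PySem.List.pyGet? arr step).getD 0 - 1) groups with ⟨b, l⟩
      rw [splitB] at hsp
      rw [hsp] at hie
      cases b
      · have hie' : innerA m ((PySem.List.pyGet? arr step).getD 0 - 1) groups = some l := by
          simpa using hie
        rw [hie']
        simpa using ih l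
          (innerA_inv m ((PySem.List.pyGet? arr step).getD 0 - 1) groups l hinv hie').1
      · have hie' : innerA m ((PySem.List.pyGet? arr step).getD 0 - 1) groups = none := by
          simpa using hie
        rw [hie']
        simp

-- ===== VERDICT (by name: the statement is the Claim_ definition above) =====
theorem findLatestStep_spec : Claim_equal_findLatestStep := by
  intro arr m _
  unfold Spec_findLatestStep findLatestStep findLatestStep_alt
  by_cases h : (arr.length : Int) = m
  · simp [h]
  · simp only [if_neg h]
    apply loop_eq
    constructor
    · simp
    · intro g hg
      simp only [List.mem_singleton] at hg
      subst hg
      show (0 : Int) ≤ (arr.length : Int) - 1 + 1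
      omega
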